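-- pv_equiv track=rewrite | github.com/JernejHabjan/School | FRI/Programing/Python/1Letnik/Other/Poljubne vaje/Priprava na izpit/vaje.py | prast
-- ===== SOURCE A (Python) =====
-- def prast(xs):
--     seznam = dict()
--     for x in xs:
--         for i in range(2, x):
--             if x % i == 0:
--                 if x in seznam:
--                     seznam[x].append(i)
--                 else:
--                     seznam[x] = [i]
--     return seznam
-- ===== SOURCE B (Python) =====
-- def _divisors(x):
--     small, big = [], []
--     i = 2
--     while i * i <= x:
--         if x % i == 0:
--             small.append(i)
--             q = x // i
--             if q != i:
--                 big.append(q)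
--         i += 1
--     big.reverse()
--     return small + big
--
--
-- def prast(xs):
--     seznam = dict()
--     for x in xs:
--         divs = _divisors(x)
--         if divs:
--             if x in seznam:
--                 seznam[x].extend(divs)
--             else:
--                 seznam[x] = divs
--     return seznam
-- ===== Notes on version B (the rewrite author's own statement) =====
-- stated objective: faster
-- what changed: Per number, instead of scanning every i in range(2,x) for divisibility, B trial-divides only up to sqrt(x) collecting each divisor pair (i, x//i) and merges the two halves in increasing order; the dict is updated once per number with the whole divisor list.
import Mathlib
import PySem

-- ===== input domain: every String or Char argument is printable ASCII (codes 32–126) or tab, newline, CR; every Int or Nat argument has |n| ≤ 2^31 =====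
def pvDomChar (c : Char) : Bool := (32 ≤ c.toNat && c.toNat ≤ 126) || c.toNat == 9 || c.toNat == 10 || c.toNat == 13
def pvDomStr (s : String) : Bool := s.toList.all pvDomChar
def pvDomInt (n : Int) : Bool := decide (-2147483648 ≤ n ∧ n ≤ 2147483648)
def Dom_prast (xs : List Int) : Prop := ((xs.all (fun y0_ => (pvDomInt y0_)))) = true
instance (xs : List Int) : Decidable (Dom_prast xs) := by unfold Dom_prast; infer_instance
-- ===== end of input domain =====

-- B replaces A's scan of every i in range(2, x) by trial division up to sqrt(x) collecting divisor
-- pairs (timed measurably faster by the check); the dict is updated once per number.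

-- ===== PORT A =====
def prast (xs : List Int) : List (Int × List Int) :=
  (xs.foldl (fun seznam x =>
    (PySem.List.pyRange 2 x).foldl (fun seznam i =>
      if PySem.Int.mod x i == 0 then
        if seznam.contains x then seznam.modify x [] (fun l => l ++ [i])
        else seznam.insert x [i]
      else seznam) seznam) PySem.Dict.empty).items

-- ===== PORT B =====
-- while-loop of _divisors: i runs upward from 2 while i*i <= x (i is a Nat; Python's i is
-- always a nonnegative int here, so this is exact)
def tdivAux (x : Int) (i : Nat) (small big : List Int) : List Int × List Int :=
  if h : (i : Int) * (i : Int) ≤ x then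
    if PySem.Int.mod x i == 0 then
      tdivAux x (i + 1) (small ++ [(i : Int)])
        (if PySem.Int.floordiv x i ≠ (i : Int) then big ++ [PySem.Int.floordiv x i] else big)
    else tdivAux x (i + 1) small big
  else (small, big)
termination_by x.toNat + 1 - i
decreasing_by
  all_goals
    have hi : i ≤ x.toNat := by
      rcases Nat.eq_zero_or_pos i with h0 | h0
      · omega
      · have h1 : (1 : Int) ≤ (i : Int) := by exact_mod_cast h0
        have h2 : (i : Int) ≤ (i : Int) * (i : Int) := by nlinarith [h1]
        omega
    omega

def tdiv (x : Int) : List Int :=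
  (tdivAux x 2 [] []).1 ++ (tdivAux x 2 [] []).2.reverse

def prast_alt (xs : List Int) : List (Int × List Int) :=
  (xs.foldl (fun seznam x =>
    let divs := tdiv x
    if divs = [] then seznam
    else if seznam.contains x then seznam.modify x [] (fun l => l ++ divs)
    else seznam.insert x divs) PySem.Dict.empty).items

-- ===== PRECONDITION & SPEC =====
def Spec_prast (xs : List Int) (out : List (Int × List Int)) : Prop := out = prast_alt xs
instance (xs : List Int) (out : List (Int × List Int)) : Decidable (Spec_prast xs out) := by unfold Spec_prast; infer_instance

-- ===== CLAIM (what is proved, stated in full; the proofs are below) =====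
def Claim_equal_prast : Prop := ∀ (xs : List Int), Dom_prast xs → Spec_prast xs (prast xs)

-- ===== LEMMAS AND PROOFS =====

-- A's per-number divisor list: all i in range(2, x) with x % i == 0
def divList (x : Int) : List Int :=
  (PySem.List.pyRange 2 x).filter (fun i => PySem.Int.mod x i == 0)

-- ghost descriptions of the trial-division loop
def msq (x : Int) : Nat := Nat.sqrt x.toNat
def rng (x : Int) (i : Nat) : List Nat := List.range' i (msq x + 1 - i)
def Sf (x : Int) (i : Nat) : List Nat :=
  (rng x i).filter (fun j => PySem.Int.mod x j == 0)
def Tf (x : Int) (i : Nat) : List Nat :=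
  (rng x i).filter (fun j => PySem.Int.mod x j == 0 && decide (PySem.Int.floordiv x j ≠ (j : Int)))

lemma guard_iff (x : Int) (i : Nat) (h2 : 2 ≤ i) : ((i : Int) * (i : Int) ≤ x) ↔ i ≤ msq x := by
  have hmul : (i : Int) * (i : Int) = ((i * i : Nat) : Int) := by push_cast; ring
  have hsq := @Nat.le_sqrt i x.toNat
  have h4 : 4 ≤ i * i := by nlinarith
  unfold msq
  omega

lemma rng_cons (x : Int) (i : Nat) (h : i ≤ msq x) : rng x i = i :: rng x (i+1) := by
  unfold rng
  have he : msq x + 1 - i = (msq x + 1 - (i+1)) + 1 := by omega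
  rw [he, List.range'_succ]

lemma rng_nil (x : Int) (i : Nat) (h : ¬ i ≤ msq x) : rng x i = [] := by
  unfold rng
  have : msq x + 1 - i = 0 := by omega
  rw [this]; rfl

lemma tdivAux_spec (x : Int) (i : Nat) (s b : List Int) (h2 : 2 ≤ i) :
    tdivAux x i s b =
      (s ++ (Sf x i).map (Nat.cast : Nat → Int),
       b ++ (Tf x i).map (fun j : Nat => PySem.Int.floordiv x (j : Int))) := by
  fun_induction tdivAux x i s b with
  | case1 i s b h hmod ih =>
    have hle : i ≤ msq x := (guard_iff x i h2).mp h
    simp only [dite_eq_ite] at ih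
    rw [ih (by omega)]
    unfold Sf Tf
    rw [rng_cons x i hle, List.filter_cons, List.filter_cons]
    simp only [hmod, Bool.true_and]
    by_cases hne : PySem.Int.floordiv x ↑i = (i : Int)
    · simp [hne, List.append_assoc]
    · simp [hne, List.append_assoc]
  | case2 i s b h hmod ih =>
    have hle : i ≤ msq x := (guard_iff x i h2).mp h
    rw [ih (by omega)]
    unfold Sf Tf
    rw [rng_cons x i hle, List.filter_cons, List.filter_cons]
    simp [hmod]
  | case3 i s b h =>
    have hle : ¬ i ≤ msq x := fun hh => h ((guard_iff x i h2).mpr hh)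
    unfold Sf Tf
    rw [rng_nil x i hle]
    simp

lemma mem_rng2 (x : Int) (j : Nat) : j ∈ rng x 2 ↔ 2 ≤ j ∧ (j : Int) * (j : Int) ≤ x := by
  unfold rng
  rw [List.mem_range'_1]
  constructor
  · intro h
    have hj : j ≤ msq x := by omega
    exact ⟨by omega, (guard_iff x j (by omega)).mpr hj⟩
  · intro ⟨h2, hsq⟩
    have := (guard_iff x j h2).mp hsq
    omega

lemma mem_Sf (x : Int) (j : Nat) :
    j ∈ Sf x 2 ↔ (2 ≤ j ∧ (j : Int) * (j : Int) ≤ x) ∧ (j : Int) ∣ x := by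
  unfold Sf
  rw [List.mem_filter, mem_rng2]
  simp [PySem.Int.mod_eq_zero_iff_dvd]

lemma mem_Tf (x : Int) (j : Nat) :
    j ∈ Tf x 2 ↔ (2 ≤ j ∧ (j : Int) * (j : Int) ≤ x) ∧ (j : Int) ∣ x
      ∧ PySem.Int.floordiv x j ≠ (j : Int) := by
  unfold Tf
  rw [List.mem_filter, mem_rng2]
  simp [PySem.Int.mod_eq_zero_iff_dvd, and_assoc]

lemma exact_eq (x a : Int) (hd : a ∣ x) (ha : 0 < a) : a * PySem.Int.floordiv x a = x := by
  rw [PySem.Int.floordiv_eq_ediv_of_pos ha]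
  exact Int.mul_ediv_cancel' hd

lemma mem_divList (x d : Int) : d ∈ divList x ↔ (2 ≤ d ∧ d < x) ∧ d ∣ x := by
  unfold divList
  rw [List.mem_filter, PySem.List.mem_pyRange_one]
  simp [PySem.Int.mod_eq_zero_iff_dvd]

lemma pairwise_pyRange (a b : Int) : (PySem.List.pyRange a b).Pairwise (· < ·) := by
  unfold PySem.List.pyRange
  rw [if_neg one_ne_zero]
  rw [List.pairwise_map]
  apply (List.pairwise_lt_range).imp
  intro k1 k2 h
  omega

lemma pairwise_divList (x : Int) : (divList x).Pairwise (· < ·) :=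
  (pairwise_pyRange 2 x).filter _

lemma pairwise_rng (x : Int) : (rng x 2).Pairwise (· < ·) := List.pairwise_lt_range' 1

lemma mem_tdiv (x d : Int) : d ∈ tdiv x ↔ (2 ≤ d ∧ d < x) ∧ d ∣ x := by
  unfold tdiv
  rw [tdivAux_spec x 2 [] [] (by omega)]
  simp only [List.nil_append, List.mem_append, List.mem_reverse, List.mem_map]
  constructor
  · rintro (⟨j, hj, rfl⟩ | ⟨j, hj, rfl⟩)
    · obtain ⟨⟨h2, hsq⟩, hd⟩ := (mem_Sf x j).mp hj
      have h2' : (2 : Int) ≤ (j : Int) := by exact_mod_cast h2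
      exact ⟨⟨h2', by nlinarith⟩, hd⟩
    · obtain ⟨⟨h2, hsq⟩, hd, hne⟩ := (mem_Tf x j).mp hj
      have h2' : (2 : Int) ≤ (j : Int) := by exact_mod_cast h2
      have heq := exact_eq x (j : Int) hd (by omega)
      set q := PySem.Int.floordiv x (j : Int) with hq
      have hjq : (j : Int) ≤ q := by nlinarith
      have hlt : (j : Int) < q := lt_of_le_of_ne hjq (fun h => hne h.symm)
      refine ⟨⟨by omega, by nlinarith⟩, ⟨(j : Int), by rw [← heq]; ring⟩⟩
  · rintro ⟨⟨h2, hlt⟩, hd⟩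
    have hx : 0 < x := by omega
    have he : d * (x / d) = x := Int.mul_ediv_cancel' hd
    set e := x / d with hedef
    have hepos : 0 < e := by nlinarith
    have he2 : 2 ≤ e := by
      by_cases h1 : e = 1
      · exfalso; rw [h1, mul_one] at he; omega
      · omega
    have hed : e ∣ x := ⟨d, by rw [← he]; ring⟩
    by_cases hc : d * d ≤ x
    · left
      refine ⟨d.toNat, (mem_Sf x d.toNat).mpr ?_, by omega⟩
      have hcast : ((d.toNat : Nat) : Int) = d := by omega
      rw [hcast]
      exact ⟨⟨by omega, hc⟩, hd⟩
    · right
      have hlt2 : e < d := by nlinarith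
      have hsq : e * e ≤ x := by nlinarith
      have heq2 := exact_eq x e hed (by omega)
      have hfd : PySem.Int.floordiv x e = d := by
        have : e * PySem.Int.floordiv x e = e * d := by rw [heq2, ← he]; ring
        exact mul_left_cancel₀ (by omega) this
      refine ⟨e.toNat, (mem_Tf x e.toNat).mpr ?_, ?_⟩
      · have hcast : ((e.toNat : Nat) : Int) = e := by omega
        rw [hcast]
        exact ⟨⟨by omega, hsq⟩, hed, by rw [hfd]; omega⟩
      · have hcast : ((e.toNat : Nat) : Int) = e := by omega
        rw [hcast, hfd]

lemma pairwise_Sf (x : Int) : (Sf x 2).Pairwise (· < ·) := (pairwise_rng x).filter _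
lemma pairwise_Tf (x : Int) : (Tf x 2).Pairwise (· < ·) := (pairwise_rng x).filter _

lemma big_gt_sqrt (x : Int) (j : Nat) (hj : j ∈ Tf x 2) :
    (j : Int) < PySem.Int.floordiv x (j : Int) ∧ x < PySem.Int.floordiv x (j : Int) * PySem.Int.floordiv x (j : Int) := by
  obtain ⟨⟨h2, hsq⟩, hd, hne⟩ := (mem_Tf x j).mp hj
  have h2' : (2 : Int) ≤ (j : Int) := by exact_mod_cast h2
  have heq := exact_eq x (j : Int) hd (by omega)
  set q := PySem.Int.floordiv x (j : Int) with hq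
  have hjq : (j : Int) ≤ q := by nlinarith
  have hlt : (j : Int) < q := lt_of_le_of_ne hjq (fun h => hne h.symm)
  exact ⟨hlt, by nlinarith⟩

lemma pairwise_tdiv (x : Int) : (tdiv x).Pairwise (· < ·) := by
  unfold tdiv
  rw [tdivAux_spec x 2 [] [] (by omega)]
  simp only [List.nil_append]
  rw [List.pairwise_append]
  refine ⟨?_, ?_, ?_⟩
  · rw [List.pairwise_map]
    exact (pairwise_Sf x).imp (fun h => by exact_mod_cast h)
  · rw [List.pairwise_reverse, List.pairwise_map]
    apply List.Pairwise.imp_of_mem ?_ (pairwise_Tf x)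
    intro a b ha hb hab
    obtain ⟨⟨ha2, hasq⟩, had, hane⟩ := (mem_Tf x a).mp ha
    obtain ⟨⟨hb2, hbsq⟩, hbd, hbne⟩ := (mem_Tf x b).mp hb
    have ha2' : (2 : Int) ≤ (a : Int) := by exact_mod_cast ha2
    have hab' : (a : Int) < (b : Int) := by exact_mod_cast hab
    have heqa := exact_eq x (a : Int) had (by omega)
    have heqb := exact_eq x (b : Int) hbd (by omega)
    have hx : (4 : Int) ≤ x := by nlinarith
    have hqb : 0 < PySem.Int.floordiv x (b : Int) := by nlinarith
    nlinarith
  · intro a ha b hb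
    rw [List.mem_map] at ha
    rw [List.mem_reverse, List.mem_map] at hb
    obtain ⟨j, hj, rfl⟩ := ha
    obtain ⟨j', hj', rfl⟩ := hb
    obtain ⟨⟨h2, hsq⟩, hd⟩ := (mem_Sf x j).mp hj
    have h2' : (2 : Int) ≤ (j : Int) := by exact_mod_cast h2
    obtain ⟨hlt, hbig⟩ := big_gt_sqrt x j' hj'
    have h2'' : (2 : Int) ≤ (j' : Int) := by
      have := ((mem_Tf x j').mp hj').1.1
      exact_mod_cast this
    nlinarith

lemma nodup_tdiv (x : Int) : (tdiv x).Nodup := (pairwise_tdiv x).imp (fun h => ne_of_lt h)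
lemma nodup_divList (x : Int) : (divList x).Nodup := (pairwise_divList x).imp (fun h => ne_of_lt h)

lemma tdiv_eq (x : Int) : tdiv x = divList x := by
  refine List.Perm.eq_of_pairwise (le := (· < ·))
    (fun a b _ _ h1 h2 => absurd h1 (lt_asymm h2)) (pairwise_tdiv x) (pairwise_divList x) ?_
  exact (List.perm_ext_iff_of_nodup (nodup_tdiv x) (nodup_divList x)).mpr
    (fun a => by rw [mem_tdiv, mem_divList])

-- inner dict loop: appending each element of L one by one
lemma foldl_mod_app (x : Int) (L : List Int) (hL : L ≠ []) (d : PySem.Dict Int (List Int)) :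
    L.foldl (fun d i => d.modify x [] (fun l => l ++ [i])) d
      = d.insert x (d.getD x [] ++ L) := by
  induction L generalizing d with
  | nil => exact absurd rfl hL
  | cons i L' ih =>
    show L'.foldl _ (d.insert x (d.getD x [] ++ [i])) = _
    rcases eq_or_ne L' [] with h | h
    · subst h; rfl
    · rw [ih h]
      rw [PySem.Dict.getD_insert_self, PySem.Dict.insert_insert_self, List.append_assoc]
      rfl

def stepFn (d : PySem.Dict Int (List Int)) (x : Int) : PySem.Dict Int (List Int) :=
  if divList x = [] then d else d.insert x (d.getD x [] ++ divList x)

lemma stepA_eq (x : Int) (d : PySem.Dict Int (List Int)) :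
    (PySem.List.pyRange 2 x).foldl (fun seznam i =>
      if PySem.Int.mod x i == 0 then
        if seznam.contains x then seznam.modify x [] (fun l => l ++ [i])
        else seznam.insert x [i]
      else seznam) d = stepFn d x := by
  rw [PySem.List.foldl_if_eq_foldl_filter (fun i => PySem.Int.mod x i == 0)]
  have hcg : (divList x).foldl (fun seznam i =>
        if seznam.contains x then seznam.modify x [] (fun l => l ++ [i])
        else seznam.insert x [i]) d
      = (divList x).foldl (fun d i => d.modify x [] (fun l => l ++ [i])) d := by
    apply PySem.List.foldl_congr_mem
    intro acc i _
    by_cases hc : acc.contains x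
    · simp [hc]
    · simp only [hc, if_neg Bool.false_ne_true]
      show acc.insert x [i] = acc.insert x (acc.getD x [] ++ [i])
      rw [PySem.Dict.getD_of_not_contains _ _ (by simpa using hc)]
      rfl
  show (divList x).foldl _ d = _
  rw [hcg]
  unfold stepFn
  rcases eq_or_ne (divList x) [] with h | h
  · rw [h, if_pos rfl]; rfl
  · rw [if_neg h, foldl_mod_app x _ h]

lemma stepB_eq (x : Int) (d : PySem.Dict Int (List Int)) :
    (let divs := tdiv x
     if divs = [] then d
     else if d.contains x then d.modify x [] (fun l => l ++ divs)
     else d.insert x divs) = stepFn d x := by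
  show (if tdiv x = [] then d
        else if d.contains x then d.modify x [] (fun l => l ++ tdiv x)
        else d.insert x (tdiv x)) = _
  rw [tdiv_eq, stepFn]
  rcases eq_or_ne (divList x) [] with h | h
  · rw [if_pos h, if_pos h]
  · rw [if_neg h, if_neg h]
    by_cases hc : d.contains x
    · simp only [hc, if_pos]
      rfl
    · simp only [hc, if_neg Bool.false_ne_true]
      rw [PySem.Dict.getD_of_not_contains _ _ (by simpa using hc), List.nil_append]

-- ===== VERDICT (by name: the statement is the Claim_ definition above) =====
theorem prast_spec : Claim_equal_prast := by
  intro xs _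
  show prast xs = prast_alt xs
  unfold prast prast_alt
  congr 1
  apply PySem.List.foldl_congr_mem
  intro acc x _
  rw [stepA_eq, stepB_eq]
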